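-- pv_equiv track=rewrite | github.com/egorjke93/network-automatisation | core/constants/interfaces.py | normalize_interface_short
-- ===== SOURCE A (Python) =====
-- from typing import Dict, List
--
-- INTERFACE_SHORT_MAP: List[tuple] = [
--     # Полные имена (от длинных к коротким)
--     ("twentyfivegigabitethernet", "Twe"),
--     ("twentyfivegige", "Twe"),
--     ("hundredgigabitethernet", "Hu"),
--     ("hundredgige", "Hu"),
--     ("fortygigabitethernet", "Fo"),
--     ("tfgigabitethernet", "TF"),  # QTech 10G
--     ("tengigabitethernet", "Te"),
--     ("gigabitethernet", "Gi"),
--     ("fastethernet", "Fa"),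
--     ("aggregateport", "Ag"),  # QTech LAG
--     ("ethernet", "Eth"),  # NX-OS полное: Ethernet1/1 → Eth1/1
--     ("port-channel", "Po"),
--     ("vlan", "Vl"),
--     ("loopback", "Lo"),
--     # Уже короткие формы (не менять)
--     ("eth", "Eth"),  # Eth1/1 → Eth1/1 (без изменений)
--     ("twe", "Twe"),  # Twe1/0/17 (уже короткий)
--     ("ten", "Te"),  # Ten 1/1/4 (CDP формат)
-- ]
--
-- def normalize_interface_short(interface: str, lowercase: bool = False) -> str:
--     """
--     Сокращает имя интерфейса.
--
--     GigabitEthernet0/1 -> Gi0/1 (или gi0/1 с lowercase=True)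
--
--     Поддерживает:
--     - Полные имена: GigabitEthernet, TenGigabitEthernet, etc.
--     - CDP/LLDP форматы: "Ten 1/1/4" -> "Te1/1/4"
--     - Пробелы в именах интерфейсов
--
--     Args:
--         interface: Полное имя интерфейса
--         lowercase: Приводить к нижнему регистру для сравнения
--
--     Returns:
--         str: Сокращённое имя
--     """
--     if not interface:
--         return ""
--
--     # Убираем пробелы между типом и номером (CDP/LLDP формат: "Ten 1/1/4")
--     result = interface.replace(" ", "").strip()
--     result_lower = result.lower()
--
--     # Ищем совпадение в маппинге (порядок важен — длинные первыми)
--     for full_lower, short in INTERFACE_SHORT_MAP: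
--         if result_lower.startswith(full_lower):
--             result = short + result[len(full_lower) :]
--             break
--
--     return result.lower() if lowercase else result
-- ===== SOURCE B (Python) =====
-- # Hand-compiled dispatch ("switch") on the first character of the lowered name,
-- # instead of scanning the ordered 17-entry prefix list: a prefix can only match
-- # a string sharing its first character, and within each first-character bucket
-- # the original list's order is preserved, so first-match is unchanged.
--
-- def normalize_interface_short(interface: str, lowercase: bool = False) -> str:
--     if not interface:
--         return ""
--     result = interface.replace(" ", "").strip()
--     rl = result.lower()
--     c = rl[:1]
--     if c == "t":
--         if rl.startswith("twentyfivegigabitethernet"): result = "Twe" + result[25:]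
--         elif rl.startswith("twentyfivegige"): result = "Twe" + result[14:]
--         elif rl.startswith("tfgigabitethernet"): result = "TF" + result[17:]
--         elif rl.startswith("tengigabitethernet"): result = "Te" + result[18:]
--         elif rl.startswith("twe"): result = "Twe" + result[3:]
--         elif rl.startswith("ten"): result = "Te" + result[3:]
--     elif c == "h":
--         if rl.startswith("hundredgigabitethernet"): result = "Hu" + result[22:]
--         elif rl.startswith("hundredgige"): result = "Hu" + result[11:]
--     elif c == "f":
--         if rl.startswith("fortygigabitethernet"): result = "Fo" + result[20:]
--         elif rl.startswith("fastethernet"): result = "Fa" + result[12:]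
--     elif c == "g":
--         if rl.startswith("gigabitethernet"): result = "Gi" + result[15:]
--     elif c == "a":
--         if rl.startswith("aggregateport"): result = "Ag" + result[13:]
--     elif c == "e":
--         if rl.startswith("ethernet"): result = "Eth" + result[8:]
--         elif rl.startswith("eth"): result = "Eth" + result[3:]
--     elif c == "p":
--         if rl.startswith("port-channel"): result = "Po" + result[12:]
--     elif c == "v":
--         if rl.startswith("vlan"): result = "Vl" + result[4:]
--     elif c == "l":
--         if rl.startswith("loopback"): result = "Lo" + result[8:]
--     return result.lower() if lowercase else result
-- ===== Notes on version B (the rewrite author's own statement) =====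
-- stated objective: alternative
-- what changed: A scans the ordered 17-entry prefix list with startswith until the first match; B replaces the data-driven scan by a hand-compiled dispatch on the first character of the lowered name (a trie-like switch), testing only the few prefixes in that bucket, valid because a prefix can only match a string sharing its first character and each bucket keeps the list's order.
import Mathlib
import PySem

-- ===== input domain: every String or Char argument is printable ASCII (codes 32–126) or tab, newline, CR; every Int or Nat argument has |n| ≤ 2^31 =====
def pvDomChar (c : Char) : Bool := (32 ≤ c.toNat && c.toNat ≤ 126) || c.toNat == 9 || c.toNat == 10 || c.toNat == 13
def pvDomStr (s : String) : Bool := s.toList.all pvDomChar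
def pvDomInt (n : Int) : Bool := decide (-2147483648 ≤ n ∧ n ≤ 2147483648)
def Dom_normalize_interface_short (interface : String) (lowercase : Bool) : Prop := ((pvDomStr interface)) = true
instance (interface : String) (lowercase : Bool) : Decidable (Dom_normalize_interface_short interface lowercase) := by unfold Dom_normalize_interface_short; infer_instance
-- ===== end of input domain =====

-- B replaces A's data-driven ordered scan of the 17-entry prefix list by a hand-compiled
-- dispatch on the first character of the lowered name (objective: alternative).

-- ===== PORT A =====
-- INTERFACE_SHORT_MAP, as (full_lower, short) pairs of char lists
def pvMapA : List (List Char × List Char) :=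
  [("twentyfivegigabitethernet".toList, "Twe".toList),
   ("twentyfivegige".toList, "Twe".toList),
   ("hundredgigabitethernet".toList, "Hu".toList),
   ("hundredgige".toList, "Hu".toList),
   ("fortygigabitethernet".toList, "Fo".toList),
   ("tfgigabitethernet".toList, "TF".toList),
   ("tengigabitethernet".toList, "Te".toList),
   ("gigabitethernet".toList, "Gi".toList),
   ("fastethernet".toList, "Fa".toList),
   ("aggregateport".toList, "Ag".toList),
   ("ethernet".toList, "Eth".toList),
   ("port-channel".toList, "Po".toList),
   ("vlan".toList, "Vl".toList),
   ("loopback".toList, "Lo".toList),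
   ("eth".toList, "Eth".toList),
   ("twe".toList, "Twe".toList),
   ("ten".toList, "Te".toList)]

-- the 'for full_lower, short in INTERFACE_SHORT_MAP: if result_lower.startswith(...): ...; break' loop;
-- result[len(full_lower):] is a slice from a nonnegative index, i.e. List.drop (exact)
def scanA : List (List Char × List Char) → List Char → List Char → List Char
  | [], _, res => res
  | (full, short) :: rest, rl, res =>
    if PySem.Chars.startswith rl full then short ++ res.drop full.length
    else scanA rest rl res

def normalize_interface_short (interface : String) (lowercase : Bool) : String :=
  if interface = "" then ""
  else
    let result := (PySem.Str.strip (PySem.Str.replace interface " " "")).toList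
    let result_lower := PySem.Chars.lower result
    let result := scanA pvMapA result_lower result
    if lowercase then String.ofList (PySem.Chars.lower result) else String.ofList result

-- ===== PORT B =====
-- Source B's if/elif chain on c = rl[:1] (empty rl falls through to no branch, i.e. res unchanged);
-- rl.startswith(p) → PySem.Chars.startswith, result[n:] at a nonnegative literal n → List.drop n (exact)
def dispatchB (rl res : List Char) : List Char :=
  match rl with
  | [] => res
  | c :: _ =>
    if c = 't' then
      if PySem.Chars.startswith rl "twentyfivegigabitethernet".toList then "Twe".toList ++ res.drop 25
      else if PySem.Chars.startswith rl "twentyfivegige".toList then "Twe".toList ++ res.drop 14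
      else if PySem.Chars.startswith rl "tfgigabitethernet".toList then "TF".toList ++ res.drop 17
      else if PySem.Chars.startswith rl "tengigabitethernet".toList then "Te".toList ++ res.drop 18
      else if PySem.Chars.startswith rl "twe".toList then "Twe".toList ++ res.drop 3
      else if PySem.Chars.startswith rl "ten".toList then "Te".toList ++ res.drop 3
      else res
    else if c = 'h' then
      if PySem.Chars.startswith rl "hundredgigabitethernet".toList then "Hu".toList ++ res.drop 22
      else if PySem.Chars.startswith rl "hundredgige".toList then "Hu".toList ++ res.drop 11
      else res
    else if c = 'f' then
      if PySem.Chars.startswith rl "fortygigabitethernet".toList then "Fo".toList ++ res.drop 20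
      else if PySem.Chars.startswith rl "fastethernet".toList then "Fa".toList ++ res.drop 12
      else res
    else if c = 'g' then
      if PySem.Chars.startswith rl "gigabitethernet".toList then "Gi".toList ++ res.drop 15
      else res
    else if c = 'a' then
      if PySem.Chars.startswith rl "aggregateport".toList then "Ag".toList ++ res.drop 13
      else res
    else if c = 'e' then
      if PySem.Chars.startswith rl "ethernet".toList then "Eth".toList ++ res.drop 8
      else if PySem.Chars.startswith rl "eth".toList then "Eth".toList ++ res.drop 3
      else res
    else if c = 'p' then
      if PySem.Chars.startswith rl "port-channel".toList then "Po".toList ++ res.drop 12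
      else res
    else if c = 'v' then
      if PySem.Chars.startswith rl "vlan".toList then "Vl".toList ++ res.drop 4
      else res
    else if c = 'l' then
      if PySem.Chars.startswith rl "loopback".toList then "Lo".toList ++ res.drop 8
      else res
    else res

def normalize_interface_short_alt (interface : String) (lowercase : Bool) : String :=
  if interface = "" then ""
  else
    let result := (PySem.Str.strip (PySem.Str.replace interface " " "")).toList
    let rl := PySem.Chars.lower result
    let result := dispatchB rl result
    if lowercase then String.ofList (PySem.Chars.lower result) else String.ofList result

-- ===== PRECONDITION & SPEC =====
def Spec_normalize_interface_short (interface : String) (lowercase : Bool) (out : String) : Prop := out = normalize_interface_short_alt interface lowercase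
instance (interface : String) (lowercase : Bool) (out : String) : Decidable (Spec_normalize_interface_short interface lowercase out) := by unfold Spec_normalize_interface_short; infer_instance

-- ===== CLAIM (what is proved, stated in full; the proofs are below) =====
def Claim_equal_normalize_interface_short : Prop := ∀ (interface : String) (lowercase : Bool), Dom_normalize_interface_short interface lowercase → Spec_normalize_interface_short interface lowercase (normalize_interface_short interface lowercase)

-- ===== LEMMAS AND PROOFS =====

-- a nonempty prefix whose head differs from the string's head never matches
lemma pv_sw_ne {c : Char} {tl : List Char} (p : List Char) (d : Char) (hp : p.head? = some d) (hne : ¬ c = d) :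
    PySem.Chars.startswith (c :: tl) p = false := by
  cases p with
  | nil => simp at hp
  | cons e q =>
    cases hsw : PySem.Chars.startswith (c :: tl) (e :: q)
    · rfl
    · have hpre := (PySem.Chars.startswith_iff _ _).mp hsw
      have he : e = d := by simpa using hp
      exact absurd (((List.cons_prefix_cons.mp hpre).1.symm).trans he) hne

lemma pv_sw_nil (p : List Char) (hne : p ≠ []) :
    PySem.Chars.startswith ([] : List Char) p = false := by
  cases p with
  | nil => exact absurd rfl hne
  | cons d q =>
    cases hsw : PySem.Chars.startswith ([] : List Char) (d :: q)
    · rfl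
    · have hpre := (PySem.Chars.startswith_iff _ _).mp hsw
      exact absurd (List.eq_nil_of_prefix_nil hpre) (by simp)

lemma scanA_skip (full short : List Char) (rest : List (List Char × List Char)) (rl res : List Char)
    (h : PySem.Chars.startswith rl full = false) :
    scanA ((full, short) :: rest) rl res = scanA rest rl res := by
  simp only [scanA, h, Bool.false_eq_true, if_false]

lemma scanA_hit (full short : List Char) (rest : List (List Char × List Char)) (rl res : List Char)
    (h : PySem.Chars.startswith rl full = true) :
    scanA ((full, short) :: rest) rl res = short ++ res.drop full.length := by
  simp only [scanA, h, if_true]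

-- the core equivalence: the ordered list scan equals the first-character dispatch
theorem pv_scan_eq (rl res : List Char) : scanA pvMapA rl res = dispatchB rl res := by
  cases rl with
  | nil =>
    simp only [dispatchB, pvMapA]
    rw [scanA_skip _ _ _ _ _ (pv_sw_nil _ (by decide))]
    rw [scanA_skip _ _ _ _ _ (pv_sw_nil _ (by decide))]
    rw [scanA_skip _ _ _ _ _ (pv_sw_nil _ (by decide))]
    rw [scanA_skip _ _ _ _ _ (pv_sw_nil _ (by decide))]
    rw [scanA_skip _ _ _ _ _ (pv_sw_nil _ (by decide))]
    rw [scanA_skip _ _ _ _ _ (pv_sw_nil _ (by decide))]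
    rw [scanA_skip _ _ _ _ _ (pv_sw_nil _ (by decide))]
    rw [scanA_skip _ _ _ _ _ (pv_sw_nil _ (by decide))]
    rw [scanA_skip _ _ _ _ _ (pv_sw_nil _ (by decide))]
    rw [scanA_skip _ _ _ _ _ (pv_sw_nil _ (by decide))]
    rw [scanA_skip _ _ _ _ _ (pv_sw_nil _ (by decide))]
    rw [scanA_skip _ _ _ _ _ (pv_sw_nil _ (by decide))]
    rw [scanA_skip _ _ _ _ _ (pv_sw_nil _ (by decide))]
    rw [scanA_skip _ _ _ _ _ (pv_sw_nil _ (by decide))]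
    rw [scanA_skip _ _ _ _ _ (pv_sw_nil _ (by decide))]
    rw [scanA_skip _ _ _ _ _ (pv_sw_nil _ (by decide))]
    rw [scanA_skip _ _ _ _ _ (pv_sw_nil _ (by decide))]
    rfl
    | cons c tl =>
      simp only [dispatchB, pvMapA]
      by_cases hc0 : c = 't'
      · subst hc0
        rw [if_pos rfl]
        by_cases h0_1 : PySem.Chars.startswith ('t' :: tl) "twentyfivegigabitethernet".toList = true
        · rw [scanA_hit _ _ _ _ _ h0_1]
          simp only [h0_1, Bool.false_eq_true, if_false, if_true]
          rw [show ("twentyfivegigabitethernet".toList.length) = 25 from by decide]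
        rw [Bool.not_eq_true] at h0_1
        rw [scanA_skip _ _ _ _ _ h0_1]
        by_cases h0_2 : PySem.Chars.startswith ('t' :: tl) "twentyfivegige".toList = true
        · rw [scanA_hit _ _ _ _ _ h0_2]
          simp only [h0_1, h0_2, Bool.false_eq_true, if_false, if_true]
          rw [show ("twentyfivegige".toList.length) = 14 from by decide]
        rw [Bool.not_eq_true] at h0_2
        rw [scanA_skip _ _ _ _ _ h0_2]
        rw [scanA_skip _ _ _ _ _ (pv_sw_ne _ 'h' (by decide) (by decide))]
        rw [scanA_skip _ _ _ _ _ (pv_sw_ne _ 'h' (by decide) (by decide))]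
        rw [scanA_skip _ _ _ _ _ (pv_sw_ne _ 'f' (by decide) (by decide))]
        by_cases h0_3 : PySem.Chars.startswith ('t' :: tl) "tfgigabitethernet".toList = true
        · rw [scanA_hit _ _ _ _ _ h0_3]
          simp only [h0_1, h0_2, h0_3, Bool.false_eq_true, if_false, if_true]
          rw [show ("tfgigabitethernet".toList.length) = 17 from by decide]
        rw [Bool.not_eq_true] at h0_3
        rw [scanA_skip _ _ _ _ _ h0_3]
        by_cases h0_4 : PySem.Chars.startswith ('t' :: tl) "tengigabitethernet".toList = true
        · rw [scanA_hit _ _ _ _ _ h0_4]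
          simp only [h0_1, h0_2, h0_3, h0_4, Bool.false_eq_true, if_false, if_true]
          rw [show ("tengigabitethernet".toList.length) = 18 from by decide]
        rw [Bool.not_eq_true] at h0_4
        rw [scanA_skip _ _ _ _ _ h0_4]
        rw [scanA_skip _ _ _ _ _ (pv_sw_ne _ 'g' (by decide) (by decide))]
        rw [scanA_skip _ _ _ _ _ (pv_sw_ne _ 'f' (by decide) (by decide))]
        rw [scanA_skip _ _ _ _ _ (pv_sw_ne _ 'a' (by decide) (by decide))]
        rw [scanA_skip _ _ _ _ _ (pv_sw_ne _ 'e' (by decide) (by decide))]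
        rw [scanA_skip _ _ _ _ _ (pv_sw_ne _ 'p' (by decide) (by decide))]
        rw [scanA_skip _ _ _ _ _ (pv_sw_ne _ 'v' (by decide) (by decide))]
        rw [scanA_skip _ _ _ _ _ (pv_sw_ne _ 'l' (by decide) (by decide))]
        rw [scanA_skip _ _ _ _ _ (pv_sw_ne _ 'e' (by decide) (by decide))]
        by_cases h0_5 : PySem.Chars.startswith ('t' :: tl) "twe".toList = true
        · rw [scanA_hit _ _ _ _ _ h0_5]
          simp only [h0_1, h0_2, h0_3, h0_4, h0_5, Bool.false_eq_true, if_false, if_true]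
          rw [show ("twe".toList.length) = 3 from by decide]
        rw [Bool.not_eq_true] at h0_5
        rw [scanA_skip _ _ _ _ _ h0_5]
        by_cases h0_6 : PySem.Chars.startswith ('t' :: tl) "ten".toList = true
        · rw [scanA_hit _ _ _ _ _ h0_6]
          simp only [h0_1, h0_2, h0_3, h0_4, h0_5, h0_6, Bool.false_eq_true, if_false, if_true]
          rw [show ("ten".toList.length) = 3 from by decide]
        rw [Bool.not_eq_true] at h0_6
        rw [scanA_skip _ _ _ _ _ h0_6]
        simp only [h0_1, h0_2, h0_3, h0_4, h0_5, h0_6, Bool.false_eq_true, if_false]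
        rfl
      by_cases hc1 : c = 'h'
      · subst hc1
        rw [if_neg (by decide : ¬ ('h' : Char) = 't')]
        rw [if_pos rfl]
        rw [scanA_skip _ _ _ _ _ (pv_sw_ne _ 't' (by decide) (by decide))]
        rw [scanA_skip _ _ _ _ _ (pv_sw_ne _ 't' (by decide) (by decide))]
        by_cases h1_1 : PySem.Chars.startswith ('h' :: tl) "hundredgigabitethernet".toList = true
        · rw [scanA_hit _ _ _ _ _ h1_1]
          simp only [h1_1, Bool.false_eq_true, if_false, if_true]
          rw [show ("hundredgigabitethernet".toList.length) = 22 from by decide]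
        rw [Bool.not_eq_true] at h1_1
        rw [scanA_skip _ _ _ _ _ h1_1]
        by_cases h1_2 : PySem.Chars.startswith ('h' :: tl) "hundredgige".toList = true
        · rw [scanA_hit _ _ _ _ _ h1_2]
          simp only [h1_1, h1_2, Bool.false_eq_true, if_false, if_true]
          rw [show ("hundredgige".toList.length) = 11 from by decide]
        rw [Bool.not_eq_true] at h1_2
        rw [scanA_skip _ _ _ _ _ h1_2]
        rw [scanA_skip _ _ _ _ _ (pv_sw_ne _ 'f' (by decide) (by decide))]
        rw [scanA_skip _ _ _ _ _ (pv_sw_ne _ 't' (by decide) (by decide))]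
        rw [scanA_skip _ _ _ _ _ (pv_sw_ne _ 't' (by decide) (by decide))]
        rw [scanA_skip _ _ _ _ _ (pv_sw_ne _ 'g' (by decide) (by decide))]
        rw [scanA_skip _ _ _ _ _ (pv_sw_ne _ 'f' (by decide) (by decide))]
        rw [scanA_skip _ _ _ _ _ (pv_sw_ne _ 'a' (by decide) (by decide))]
        rw [scanA_skip _ _ _ _ _ (pv_sw_ne _ 'e' (by decide) (by decide))]
        rw [scanA_skip _ _ _ _ _ (pv_sw_ne _ 'p' (by decide) (by decide))]
        rw [scanA_skip _ _ _ _ _ (pv_sw_ne _ 'v' (by decide) (by decide))]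
        rw [scanA_skip _ _ _ _ _ (pv_sw_ne _ 'l' (by decide) (by decide))]
        rw [scanA_skip _ _ _ _ _ (pv_sw_ne _ 'e' (by decide) (by decide))]
        rw [scanA_skip _ _ _ _ _ (pv_sw_ne _ 't' (by decide) (by decide))]
        rw [scanA_skip _ _ _ _ _ (pv_sw_ne _ 't' (by decide) (by decide))]
        simp only [h1_1, h1_2, Bool.false_eq_true, if_false]
        rfl
      by_cases hc2 : c = 'f'
      · subst hc2
        rw [if_neg (by decide : ¬ ('f' : Char) = 't')]
        rw [if_neg (by decide : ¬ ('f' : Char) = 'h')]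
        rw [if_pos rfl]
        rw [scanA_skip _ _ _ _ _ (pv_sw_ne _ 't' (by decide) (by decide))]
        rw [scanA_skip _ _ _ _ _ (pv_sw_ne _ 't' (by decide) (by decide))]
        rw [scanA_skip _ _ _ _ _ (pv_sw_ne _ 'h' (by decide) (by decide))]
        rw [scanA_skip _ _ _ _ _ (pv_sw_ne _ 'h' (by decide) (by decide))]
        by_cases h2_1 : PySem.Chars.startswith ('f' :: tl) "fortygigabitethernet".toList = true
        · rw [scanA_hit _ _ _ _ _ h2_1]
          simp only [h2_1, Bool.false_eq_true, if_false, if_true]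
          rw [show ("fortygigabitethernet".toList.length) = 20 from by decide]
        rw [Bool.not_eq_true] at h2_1
        rw [scanA_skip _ _ _ _ _ h2_1]
        rw [scanA_skip _ _ _ _ _ (pv_sw_ne _ 't' (by decide) (by decide))]
        rw [scanA_skip _ _ _ _ _ (pv_sw_ne _ 't' (by decide) (by decide))]
        rw [scanA_skip _ _ _ _ _ (pv_sw_ne _ 'g' (by decide) (by decide))]
        by_cases h2_2 : PySem.Chars.startswith ('f' :: tl) "fastethernet".toList = true
        · rw [scanA_hit _ _ _ _ _ h2_2]
          simp only [h2_1, h2_2, Bool.false_eq_true, if_false, if_true]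
          rw [show ("fastethernet".toList.length) = 12 from by decide]
        rw [Bool.not_eq_true] at h2_2
        rw [scanA_skip _ _ _ _ _ h2_2]
        rw [scanA_skip _ _ _ _ _ (pv_sw_ne _ 'a' (by decide) (by decide))]
        rw [scanA_skip _ _ _ _ _ (pv_sw_ne _ 'e' (by decide) (by decide))]
        rw [scanA_skip _ _ _ _ _ (pv_sw_ne _ 'p' (by decide) (by decide))]
        rw [scanA_skip _ _ _ _ _ (pv_sw_ne _ 'v' (by decide) (by decide))]
        rw [scanA_skip _ _ _ _ _ (pv_sw_ne _ 'l' (by decide) (by decide))]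
        rw [scanA_skip _ _ _ _ _ (pv_sw_ne _ 'e' (by decide) (by decide))]
        rw [scanA_skip _ _ _ _ _ (pv_sw_ne _ 't' (by decide) (by decide))]
        rw [scanA_skip _ _ _ _ _ (pv_sw_ne _ 't' (by decide) (by decide))]
        simp only [h2_1, h2_2, Bool.false_eq_true, if_false]
        rfl
      by_cases hc3 : c = 'g'
      · subst hc3
        rw [if_neg (by decide : ¬ ('g' : Char) = 't')]
        rw [if_neg (by decide : ¬ ('g' : Char) = 'h')]
        rw [if_neg (by decide : ¬ ('g' : Char) = 'f')]
        rw [if_pos rfl]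
        rw [scanA_skip _ _ _ _ _ (pv_sw_ne _ 't' (by decide) (by decide))]
        rw [scanA_skip _ _ _ _ _ (pv_sw_ne _ 't' (by decide) (by decide))]
        rw [scanA_skip _ _ _ _ _ (pv_sw_ne _ 'h' (by decide) (by decide))]
        rw [scanA_skip _ _ _ _ _ (pv_sw_ne _ 'h' (by decide) (by decide))]
        rw [scanA_skip _ _ _ _ _ (pv_sw_ne _ 'f' (by decide) (by decide))]
        rw [scanA_skip _ _ _ _ _ (pv_sw_ne _ 't' (by decide) (by decide))]
        rw [scanA_skip _ _ _ _ _ (pv_sw_ne _ 't' (by decide) (by decide))]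
        by_cases h3_1 : PySem.Chars.startswith ('g' :: tl) "gigabitethernet".toList = true
        · rw [scanA_hit _ _ _ _ _ h3_1]
          simp only [h3_1, Bool.false_eq_true, if_false, if_true]
          rw [show ("gigabitethernet".toList.length) = 15 from by decide]
        rw [Bool.not_eq_true] at h3_1
        rw [scanA_skip _ _ _ _ _ h3_1]
        rw [scanA_skip _ _ _ _ _ (pv_sw_ne _ 'f' (by decide) (by decide))]
        rw [scanA_skip _ _ _ _ _ (pv_sw_ne _ 'a' (by decide) (by decide))]
        rw [scanA_skip _ _ _ _ _ (pv_sw_ne _ 'e' (by decide) (by decide))]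
        rw [scanA_skip _ _ _ _ _ (pv_sw_ne _ 'p' (by decide) (by decide))]
        rw [scanA_skip _ _ _ _ _ (pv_sw_ne _ 'v' (by decide) (by decide))]
        rw [scanA_skip _ _ _ _ _ (pv_sw_ne _ 'l' (by decide) (by decide))]
        rw [scanA_skip _ _ _ _ _ (pv_sw_ne _ 'e' (by decide) (by decide))]
        rw [scanA_skip _ _ _ _ _ (pv_sw_ne _ 't' (by decide) (by decide))]
        rw [scanA_skip _ _ _ _ _ (pv_sw_ne _ 't' (by decide) (by decide))]
        simp only [h3_1, Bool.false_eq_true, if_false]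
        rfl
      by_cases hc4 : c = 'a'
      · subst hc4
        rw [if_neg (by decide : ¬ ('a' : Char) = 't')]
        rw [if_neg (by decide : ¬ ('a' : Char) = 'h')]
        rw [if_neg (by decide : ¬ ('a' : Char) = 'f')]
        rw [if_neg (by decide : ¬ ('a' : Char) = 'g')]
        rw [if_pos rfl]
        rw [scanA_skip _ _ _ _ _ (pv_sw_ne _ 't' (by decide) (by decide))]
        rw [scanA_skip _ _ _ _ _ (pv_sw_ne _ 't' (by decide) (by decide))]
        rw [scanA_skip _ _ _ _ _ (pv_sw_ne _ 'h' (by decide) (by decide))]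
        rw [scanA_skip _ _ _ _ _ (pv_sw_ne _ 'h' (by decide) (by decide))]
        rw [scanA_skip _ _ _ _ _ (pv_sw_ne _ 'f' (by decide) (by decide))]
        rw [scanA_skip _ _ _ _ _ (pv_sw_ne _ 't' (by decide) (by decide))]
        rw [scanA_skip _ _ _ _ _ (pv_sw_ne _ 't' (by decide) (by decide))]
        rw [scanA_skip _ _ _ _ _ (pv_sw_ne _ 'g' (by decide) (by decide))]
        rw [scanA_skip _ _ _ _ _ (pv_sw_ne _ 'f' (by decide) (by decide))]
        by_cases h4_1 : PySem.Chars.startswith ('a' :: tl) "aggregateport".toList = true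
        · rw [scanA_hit _ _ _ _ _ h4_1]
          simp only [h4_1, Bool.false_eq_true, if_false, if_true]
          rw [show ("aggregateport".toList.length) = 13 from by decide]
        rw [Bool.not_eq_true] at h4_1
        rw [scanA_skip _ _ _ _ _ h4_1]
        rw [scanA_skip _ _ _ _ _ (pv_sw_ne _ 'e' (by decide) (by decide))]
        rw [scanA_skip _ _ _ _ _ (pv_sw_ne _ 'p' (by decide) (by decide))]
        rw [scanA_skip _ _ _ _ _ (pv_sw_ne _ 'v' (by decide) (by decide))]
        rw [scanA_skip _ _ _ _ _ (pv_sw_ne _ 'l' (by decide) (by decide))]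
        rw [scanA_skip _ _ _ _ _ (pv_sw_ne _ 'e' (by decide) (by decide))]
        rw [scanA_skip _ _ _ _ _ (pv_sw_ne _ 't' (by decide) (by decide))]
        rw [scanA_skip _ _ _ _ _ (pv_sw_ne _ 't' (by decide) (by decide))]
        simp only [h4_1, Bool.false_eq_true, if_false]
        rfl
      by_cases hc5 : c = 'e'
      · subst hc5
        rw [if_neg (by decide : ¬ ('e' : Char) = 't')]
        rw [if_neg (by decide : ¬ ('e' : Char) = 'h')]
        rw [if_neg (by decide : ¬ ('e' : Char) = 'f')]
        rw [if_neg (by decide : ¬ ('e' : Char) = 'g')]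
        rw [if_neg (by decide : ¬ ('e' : Char) = 'a')]
        rw [if_pos rfl]
        rw [scanA_skip _ _ _ _ _ (pv_sw_ne _ 't' (by decide) (by decide))]
        rw [scanA_skip _ _ _ _ _ (pv_sw_ne _ 't' (by decide) (by decide))]
        rw [scanA_skip _ _ _ _ _ (pv_sw_ne _ 'h' (by decide) (by decide))]
        rw [scanA_skip _ _ _ _ _ (pv_sw_ne _ 'h' (by decide) (by decide))]
        rw [scanA_skip _ _ _ _ _ (pv_sw_ne _ 'f' (by decide) (by decide))]
        rw [scanA_skip _ _ _ _ _ (pv_sw_ne _ 't' (by decide) (by decide))]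
        rw [scanA_skip _ _ _ _ _ (pv_sw_ne _ 't' (by decide) (by decide))]
        rw [scanA_skip _ _ _ _ _ (pv_sw_ne _ 'g' (by decide) (by decide))]
        rw [scanA_skip _ _ _ _ _ (pv_sw_ne _ 'f' (by decide) (by decide))]
        rw [scanA_skip _ _ _ _ _ (pv_sw_ne _ 'a' (by decide) (by decide))]
        by_cases h5_1 : PySem.Chars.startswith ('e' :: tl) "ethernet".toList = true
        · rw [scanA_hit _ _ _ _ _ h5_1]
          simp only [h5_1, Bool.false_eq_true, if_false, if_true]
          rw [show ("ethernet".toList.length) = 8 from by decide]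
        rw [Bool.not_eq_true] at h5_1
        rw [scanA_skip _ _ _ _ _ h5_1]
        rw [scanA_skip _ _ _ _ _ (pv_sw_ne _ 'p' (by decide) (by decide))]
        rw [scanA_skip _ _ _ _ _ (pv_sw_ne _ 'v' (by decide) (by decide))]
        rw [scanA_skip _ _ _ _ _ (pv_sw_ne _ 'l' (by decide) (by decide))]
        by_cases h5_2 : PySem.Chars.startswith ('e' :: tl) "eth".toList = true
        · rw [scanA_hit _ _ _ _ _ h5_2]
          simp only [h5_1, h5_2, Bool.false_eq_true, if_false, if_true]
          rw [show ("eth".toList.length) = 3 from by decide]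
        rw [Bool.not_eq_true] at h5_2
        rw [scanA_skip _ _ _ _ _ h5_2]
        rw [scanA_skip _ _ _ _ _ (pv_sw_ne _ 't' (by decide) (by decide))]
        rw [scanA_skip _ _ _ _ _ (pv_sw_ne _ 't' (by decide) (by decide))]
        simp only [h5_1, h5_2, Bool.false_eq_true, if_false]
        rfl
      by_cases hc6 : c = 'p'
      · subst hc6
        rw [if_neg (by decide : ¬ ('p' : Char) = 't')]
        rw [if_neg (by decide : ¬ ('p' : Char) = 'h')]
        rw [if_neg (by decide : ¬ ('p' : Char) = 'f')]
        rw [if_neg (by decide : ¬ ('p' : Char) = 'g')]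
        rw [if_neg (by decide : ¬ ('p' : Char) = 'a')]
        rw [if_neg (by decide : ¬ ('p' : Char) = 'e')]
        rw [if_pos rfl]
        rw [scanA_skip _ _ _ _ _ (pv_sw_ne _ 't' (by decide) (by decide))]
        rw [scanA_skip _ _ _ _ _ (pv_sw_ne _ 't' (by decide) (by decide))]
        rw [scanA_skip _ _ _ _ _ (pv_sw_ne _ 'h' (by decide) (by decide))]
        rw [scanA_skip _ _ _ _ _ (pv_sw_ne _ 'h' (by decide) (by decide))]
        rw [scanA_skip _ _ _ _ _ (pv_sw_ne _ 'f' (by decide) (by decide))]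
        rw [scanA_skip _ _ _ _ _ (pv_sw_ne _ 't' (by decide) (by decide))]
        rw [scanA_skip _ _ _ _ _ (pv_sw_ne _ 't' (by decide) (by decide))]
        rw [scanA_skip _ _ _ _ _ (pv_sw_ne _ 'g' (by decide) (by decide))]
        rw [scanA_skip _ _ _ _ _ (pv_sw_ne _ 'f' (by decide) (by decide))]
        rw [scanA_skip _ _ _ _ _ (pv_sw_ne _ 'a' (by decide) (by decide))]
        rw [scanA_skip _ _ _ _ _ (pv_sw_ne _ 'e' (by decide) (by decide))]
        by_cases h6_1 : PySem.Chars.startswith ('p' :: tl) "port-channel".toList = true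
        · rw [scanA_hit _ _ _ _ _ h6_1]
          simp only [h6_1, Bool.false_eq_true, if_false, if_true]
          rw [show ("port-channel".toList.length) = 12 from by decide]
        rw [Bool.not_eq_true] at h6_1
        rw [scanA_skip _ _ _ _ _ h6_1]
        rw [scanA_skip _ _ _ _ _ (pv_sw_ne _ 'v' (by decide) (by decide))]
        rw [scanA_skip _ _ _ _ _ (pv_sw_ne _ 'l' (by decide) (by decide))]
        rw [scanA_skip _ _ _ _ _ (pv_sw_ne _ 'e' (by decide) (by decide))]
        rw [scanA_skip _ _ _ _ _ (pv_sw_ne _ 't' (by decide) (by decide))]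
        rw [scanA_skip _ _ _ _ _ (pv_sw_ne _ 't' (by decide) (by decide))]
        simp only [h6_1, Bool.false_eq_true, if_false]
        rfl
      by_cases hc7 : c = 'v'
      · subst hc7
        rw [if_neg (by decide : ¬ ('v' : Char) = 't')]
        rw [if_neg (by decide : ¬ ('v' : Char) = 'h')]
        rw [if_neg (by decide : ¬ ('v' : Char) = 'f')]
        rw [if_neg (by decide : ¬ ('v' : Char) = 'g')]
        rw [if_neg (by decide : ¬ ('v' : Char) = 'a')]
        rw [if_neg (by decide : ¬ ('v' : Char) = 'e')]
        rw [if_neg (by decide : ¬ ('v' : Char) = 'p')]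
        rw [if_pos rfl]
        rw [scanA_skip _ _ _ _ _ (pv_sw_ne _ 't' (by decide) (by decide))]
        rw [scanA_skip _ _ _ _ _ (pv_sw_ne _ 't' (by decide) (by decide))]
        rw [scanA_skip _ _ _ _ _ (pv_sw_ne _ 'h' (by decide) (by decide))]
        rw [scanA_skip _ _ _ _ _ (pv_sw_ne _ 'h' (by decide) (by decide))]
        rw [scanA_skip _ _ _ _ _ (pv_sw_ne _ 'f' (by decide) (by decide))]
        rw [scanA_skip _ _ _ _ _ (pv_sw_ne _ 't' (by decide) (by decide))]
        rw [scanA_skip _ _ _ _ _ (pv_sw_ne _ 't' (by decide) (by decide))]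
        rw [scanA_skip _ _ _ _ _ (pv_sw_ne _ 'g' (by decide) (by decide))]
        rw [scanA_skip _ _ _ _ _ (pv_sw_ne _ 'f' (by decide) (by decide))]
        rw [scanA_skip _ _ _ _ _ (pv_sw_ne _ 'a' (by decide) (by decide))]
        rw [scanA_skip _ _ _ _ _ (pv_sw_ne _ 'e' (by decide) (by decide))]
        rw [scanA_skip _ _ _ _ _ (pv_sw_ne _ 'p' (by decide) (by decide))]
        by_cases h7_1 : PySem.Chars.startswith ('v' :: tl) "vlan".toList = true
        · rw [scanA_hit _ _ _ _ _ h7_1]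
          simp only [h7_1, Bool.false_eq_true, if_false, if_true]
          rw [show ("vlan".toList.length) = 4 from by decide]
        rw [Bool.not_eq_true] at h7_1
        rw [scanA_skip _ _ _ _ _ h7_1]
        rw [scanA_skip _ _ _ _ _ (pv_sw_ne _ 'l' (by decide) (by decide))]
        rw [scanA_skip _ _ _ _ _ (pv_sw_ne _ 'e' (by decide) (by decide))]
        rw [scanA_skip _ _ _ _ _ (pv_sw_ne _ 't' (by decide) (by decide))]
        rw [scanA_skip _ _ _ _ _ (pv_sw_ne _ 't' (by decide) (by decide))]
        simp only [h7_1, Bool.false_eq_true, if_false]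
        rfl
      by_cases hc8 : c = 'l'
      · subst hc8
        rw [if_neg (by decide : ¬ ('l' : Char) = 't')]
        rw [if_neg (by decide : ¬ ('l' : Char) = 'h')]
        rw [if_neg (by decide : ¬ ('l' : Char) = 'f')]
        rw [if_neg (by decide : ¬ ('l' : Char) = 'g')]
        rw [if_neg (by decide : ¬ ('l' : Char) = 'a')]
        rw [if_neg (by decide : ¬ ('l' : Char) = 'e')]
        rw [if_neg (by decide : ¬ ('l' : Char) = 'p')]
        rw [if_neg (by decide : ¬ ('l' : Char) = 'v')]
        rw [if_pos rfl]
        rw [scanA_skip _ _ _ _ _ (pv_sw_ne _ 't' (by decide) (by decide))]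
        rw [scanA_skip _ _ _ _ _ (pv_sw_ne _ 't' (by decide) (by decide))]
        rw [scanA_skip _ _ _ _ _ (pv_sw_ne _ 'h' (by decide) (by decide))]
        rw [scanA_skip _ _ _ _ _ (pv_sw_ne _ 'h' (by decide) (by decide))]
        rw [scanA_skip _ _ _ _ _ (pv_sw_ne _ 'f' (by decide) (by decide))]
        rw [scanA_skip _ _ _ _ _ (pv_sw_ne _ 't' (by decide) (by decide))]
        rw [scanA_skip _ _ _ _ _ (pv_sw_ne _ 't' (by decide) (by decide))]
        rw [scanA_skip _ _ _ _ _ (pv_sw_ne _ 'g' (by decide) (by decide))]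
        rw [scanA_skip _ _ _ _ _ (pv_sw_ne _ 'f' (by decide) (by decide))]
        rw [scanA_skip _ _ _ _ _ (pv_sw_ne _ 'a' (by decide) (by decide))]
        rw [scanA_skip _ _ _ _ _ (pv_sw_ne _ 'e' (by decide) (by decide))]
        rw [scanA_skip _ _ _ _ _ (pv_sw_ne _ 'p' (by decide) (by decide))]
        rw [scanA_skip _ _ _ _ _ (pv_sw_ne _ 'v' (by decide) (by decide))]
        by_cases h8_1 : PySem.Chars.startswith ('l' :: tl) "loopback".toList = true
        · rw [scanA_hit _ _ _ _ _ h8_1]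
          simp only [h8_1, Bool.false_eq_true, if_false, if_true]
          rw [show ("loopback".toList.length) = 8 from by decide]
        rw [Bool.not_eq_true] at h8_1
        rw [scanA_skip _ _ _ _ _ h8_1]
        rw [scanA_skip _ _ _ _ _ (pv_sw_ne _ 'e' (by decide) (by decide))]
        rw [scanA_skip _ _ _ _ _ (pv_sw_ne _ 't' (by decide) (by decide))]
        rw [scanA_skip _ _ _ _ _ (pv_sw_ne _ 't' (by decide) (by decide))]
        simp only [h8_1, Bool.false_eq_true, if_false]
        rfl
      rw [if_neg hc0]
      rw [if_neg hc1]
      rw [if_neg hc2]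
      rw [if_neg hc3]
      rw [if_neg hc4]
      rw [if_neg hc5]
      rw [if_neg hc6]
      rw [if_neg hc7]
      rw [if_neg hc8]
      rw [scanA_skip _ _ _ _ _ (pv_sw_ne _ 't' (by decide) hc0)]
      rw [scanA_skip _ _ _ _ _ (pv_sw_ne _ 't' (by decide) hc0)]
      rw [scanA_skip _ _ _ _ _ (pv_sw_ne _ 'h' (by decide) hc1)]
      rw [scanA_skip _ _ _ _ _ (pv_sw_ne _ 'h' (by decide) hc1)]
      rw [scanA_skip _ _ _ _ _ (pv_sw_ne _ 'f' (by decide) hc2)]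
      rw [scanA_skip _ _ _ _ _ (pv_sw_ne _ 't' (by decide) hc0)]
      rw [scanA_skip _ _ _ _ _ (pv_sw_ne _ 't' (by decide) hc0)]
      rw [scanA_skip _ _ _ _ _ (pv_sw_ne _ 'g' (by decide) hc3)]
      rw [scanA_skip _ _ _ _ _ (pv_sw_ne _ 'f' (by decide) hc2)]
      rw [scanA_skip _ _ _ _ _ (pv_sw_ne _ 'a' (by decide) hc4)]
      rw [scanA_skip _ _ _ _ _ (pv_sw_ne _ 'e' (by decide) hc5)]
      rw [scanA_skip _ _ _ _ _ (pv_sw_ne _ 'p' (by decide) hc6)]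
      rw [scanA_skip _ _ _ _ _ (pv_sw_ne _ 'v' (by decide) hc7)]
      rw [scanA_skip _ _ _ _ _ (pv_sw_ne _ 'l' (by decide) hc8)]
      rw [scanA_skip _ _ _ _ _ (pv_sw_ne _ 'e' (by decide) hc5)]
      rw [scanA_skip _ _ _ _ _ (pv_sw_ne _ 't' (by decide) hc0)]
      rw [scanA_skip _ _ _ _ _ (pv_sw_ne _ 't' (by decide) hc0)]
      rfl

-- ===== VERDICT (by name: the statement is the Claim_ definition above) =====
theorem normalize_interface_short_spec : Claim_equal_normalize_interface_short := by
  intro interface lowercase _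
  unfold Spec_normalize_interface_short normalize_interface_short normalize_interface_short_alt
  by_cases h : interface = ""
  · simp [h]
  · simp only [h]
    rw [pv_scan_eq]
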